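-- pv_equiv track=rewrite | github.com/Jaiashar/vora-business-finder | lsu_supplement_scraper.py | is_admin_email
-- ===== SOURCE A (Python) =====
-- def is_admin_email(email):
--     admin_patterns = [
--         'info@', 'admin@', 'office@', 'dept@', 'webmaster@', 'help@',
--         'support@', 'contact@', 'registrar@', 'grad@', 'gradoffice@',
--         'department@', 'chair@', 'advising@', 'undergrad@', 'dean@',
--         'reception@', 'main@', 'general@', 'staff@', 'gradadmit@',
--         'calendar@', 'events@', 'news@', 'newsletter@', 'web@',
--         'marketing@', 'media@', 'communications@', 'hr@', 'hiring@',
--         'jobs@', 'career@', 'alumni@', 'development@', 'giving@',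
--         'feedback@', 'safety@', 'security@', 'facilities@', 'it@',
--         'tech@', 'helpdesk@', 'library@', 'gradapp@', 'apply@',
--         'admission@', 'admissions@', 'gradschool@', 'finaid@',
--         'testing@', 'counseling@', 'housing@', 'parking@', 'transit@',
--         'police@', 'records@', 'bursar@', 'payroll@', 'noreply@',
--         'do-not-reply@', 'donotreply@', 'enrollment@',
--         'dining@', 'athletics@', 'compliance@', 'sports@',
--         'gradstudies@', 'psychology@', 'chemistry@', 'physics@',
--         'math@', 'biology@', 'geology@', 'english@', 'history@',
--         'sociology@', 'communication@', 'philosophy@', 'polisci@',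
--         'geography@', 'manship@', 'education@', 'business@',
--         'sg@', 'greeks@', 'lsusga@', 'lsumanship@', 'lsulaw@',
--     ]
--     email_lower = email.lower()
--     return any(email_lower.startswith(p) for p in admin_patterns)
-- ===== SOURCE B (Python) =====
-- ADMIN_LOCALS = frozenset(
--     "info admin office dept webmaster help support contact registrar grad"
--     " gradoffice department chair advising undergrad dean reception main"
--     " general staff gradadmit calendar events news newsletter web marketing"
--     " media communications hr hiring jobs career alumni development giving"
--     " feedback safety security facilities it tech helpdesk library gradapp"
--     " apply admission admissions gradschool finaid testing counseling housing"
--     " parking transit police records bursar payroll noreply do-not-reply"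
--     " donotreply enrollment dining athletics compliance sports gradstudies"
--     " psychology chemistry physics math biology geology english history"
--     " sociology communication philosophy polisci geography manship education"
--     " business sg greeks lsusga lsumanship lsulaw".split())
--
-- def is_admin_email(email):
--     local, sep, _ = email.lower().partition('@')
--     return sep == '@' and local in ADMIN_LOCALS
-- ===== Notes on version B (the rewrite author's own statement) =====
-- stated objective: idiomatic
-- what changed: B replaces A's linear scan of 89 startswith tests with one derived key: it partitions the lowercased email at the first '@' and looks the local part up in a frozenset built by splitting a single word-list string.
import Mathlib
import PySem

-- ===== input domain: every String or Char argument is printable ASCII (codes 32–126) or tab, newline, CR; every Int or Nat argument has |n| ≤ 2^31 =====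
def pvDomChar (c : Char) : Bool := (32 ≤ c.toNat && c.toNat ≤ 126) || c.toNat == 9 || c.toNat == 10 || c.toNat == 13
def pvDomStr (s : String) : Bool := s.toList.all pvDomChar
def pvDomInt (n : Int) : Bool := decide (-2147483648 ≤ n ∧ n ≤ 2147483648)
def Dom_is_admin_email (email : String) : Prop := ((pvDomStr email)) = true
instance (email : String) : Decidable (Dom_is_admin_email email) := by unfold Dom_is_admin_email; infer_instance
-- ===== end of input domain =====

-- B replaces A's linear scan of 89 startswith tests by partitioning the lowercased email at
-- the first '@' and looking the local part up in a set built from one word-list string (idiomatic).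

-- ===== PORT A =====
def adminPatterns : List String := [
    "info@", "admin@", "office@", "dept@", "webmaster@", "help@",
    "support@", "contact@", "registrar@", "grad@", "gradoffice@", "department@",
    "chair@", "advising@", "undergrad@", "dean@", "reception@", "main@",
    "general@", "staff@", "gradadmit@", "calendar@", "events@", "news@",
    "newsletter@", "web@", "marketing@", "media@", "communications@", "hr@",
    "hiring@", "jobs@", "career@", "alumni@", "development@", "giving@",
    "feedback@", "safety@", "security@", "facilities@", "it@", "tech@",
    "helpdesk@", "library@", "gradapp@", "apply@", "admission@", "admissions@",
    "gradschool@", "finaid@", "testing@", "counseling@", "housing@", "parking@",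
    "transit@", "police@", "records@", "bursar@", "payroll@", "noreply@",
    "do-not-reply@", "donotreply@", "enrollment@", "dining@", "athletics@", "compliance@",
    "sports@", "gradstudies@", "psychology@", "chemistry@", "physics@", "math@",
    "biology@", "geology@", "english@", "history@", "sociology@", "communication@",
    "philosophy@", "polisci@", "geography@", "manship@", "education@", "business@",
    "sg@", "greeks@", "lsusga@", "lsumanship@", "lsulaw@"]

def is_admin_email (email : String) : Bool :=
  let email_lower := PySem.Str.lower email
  adminPatterns.any (fun p => PySem.Str.startswith email_lower p)

-- ===== PORT B =====
def adminWords : String :=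
  "info admin office dept webmaster help support contact registrar grad gradoffice department chair advising undergrad dean reception main general staff gradadmit calendar events news newsletter web marketing media communications hr hiring jobs career alumni development giving feedback safety security facilities it tech helpdesk library gradapp apply admission admissions gradschool finaid testing counseling housing parking transit police records bursar payroll noreply do-not-reply donotreply enrollment dining athletics compliance sports gradstudies psychology chemistry physics math biology geology english history sociology communication philosophy polisci geography manship education business sg greeks lsusga lsumanship lsulaw"

def ADMIN_LOCALS : PySem.Set String := PySem.Set.ofList (PySem.Str.split₀ adminWords)

def is_admin_email_alt (email : String) : Bool :=
  let s := (PySem.Str.lower email).toList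
  -- el.partition('@') ported by hand; exact for the one-character separator '@':
  -- local = the characters before the first '@', sep = "@" iff '@' occurs in el
  let localPart := String.ofList (s.takeWhile (fun c => c != '@'))
  let sep : String := if s.contains '@' then "@" else ""
  decide (sep = "@") && PySem.Set.contains ADMIN_LOCALS localPart

-- ===== PRECONDITION & SPEC =====
def Spec_is_admin_email (email : String) (out : Bool) : Prop := out = is_admin_email_alt email
instance (email : String) (out : Bool) : Decidable (Spec_is_admin_email email out) := by unfold Spec_is_admin_email; infer_instance

-- ===== CLAIM (what is proved, stated in full; the proofs are below) =====
def Claim_equal_is_admin_email : Prop := ∀ (email : String), Dom_is_admin_email email → Spec_is_admin_email email (is_admin_email email)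

-- ===== LEMMAS AND PROOFS =====

-- B's word list is exactly A's pattern list with the trailing '@' stripped from each entry
set_option maxRecDepth 20000 in
set_option maxHeartbeats 1000000 in
theorem pv_corr :
    (PySem.Str.split₀ adminWords).map String.toList
      = adminPatterns.map (fun p => p.toList.dropLast) := by decide

-- every pattern is q ++ ['@'] with no '@' in q
theorem pv_shape (p : String) (hp : p ∈ adminPatterns) :
    '@' ∉ p.toList.dropLast ∧ p.toList = p.toList.dropLast ++ ['@'] := by
  have hall : adminPatterns.all
      (fun p => (p.toList.getLast? == some '@') && !(p.toList.dropLast.contains '@')) = true := by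
    decide
  have h := List.all_eq_true.mp hall p hp
  simp only [Bool.and_eq_true, beq_iff_eq, Bool.not_eq_true'] at h
  obtain ⟨hlast, hnc⟩ := h
  have hne : p.toList ≠ [] := by
    intro h0; rw [h0] at hlast; simp at hlast
  refine ⟨?_, ?_⟩
  · intro hmem
    rw [← List.contains_iff_mem] at hmem
    rw [hnc] at hmem; exact Bool.false_ne_true hmem
  · have hsplit := List.dropLast_append_getLast hne
    rw [List.getLast?_eq_some_getLast hne, Option.some_inj] at hlast
    rw [hlast] at hsplit
    exact hsplit.symm

-- characterisation of "q ++ ['@'] is a prefix of s" for '@'-free q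
theorem pv_prefix_iff (q s : List Char) (hq : '@' ∉ q) :
    (q ++ ['@']) <+: s ↔ '@' ∈ s ∧ s.takeWhile (fun c => c != '@') = q := by
  constructor
  · rintro ⟨t, ht⟩
    have hseq : s = q ++ '@' :: t := by rw [← ht]; simp
    subst hseq
    refine ⟨by simp, ?_⟩
    rw [List.takeWhile_append_of_pos (by intro x hx; simp; rintro rfl; exact hq hx)]
    simp
  · rintro ⟨hmem, htw⟩
    obtain ⟨tl, htl⟩ : ∃ tl, s.dropWhile (fun c => c != '@') = '@' :: tl := by
      cases hcase : s.dropWhile (fun c => c != '@') with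
      | nil =>
        exfalso
        have hsplit := List.takeWhile_append_dropWhile (p := fun c => c != '@') (l := s)
        rw [hcase, List.append_nil, htw] at hsplit
        exact hq (hsplit ▸ hmem)
      | cons a tl =>
        have hd : s.dropWhile (fun c => c != '@') ≠ [] := by rw [hcase]; simp
        have hhead := List.head_dropWhile_not (fun c => c != '@') hd
        have h' : (s.dropWhile (fun c => c != '@')).head hd = a := by simp [hcase]
        rw [h'] at hhead
        have ha : a = '@' := by simpa using hhead
        exact ⟨tl, by rw [ha]⟩
    refine ⟨tl, ?_⟩
    have hsplit := List.takeWhile_append_dropWhile (p := fun c => c != '@') (l := s)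
    rw [htl, htw] at hsplit
    rw [← hsplit]; simp

-- B's set membership of a string x ↔ x's characters occur among the stripped patterns
theorem pv_mem (x : String) :
    PySem.Set.contains ADMIN_LOCALS x = true
      ↔ x.toList ∈ adminPatterns.map (fun p => p.toList.dropLast) := by
  rw [PySem.Set.contains_iff]
  unfold ADMIN_LOCALS
  rw [PySem.Set.mem_ofList, ← pv_corr]
  constructor
  · intro h; exact List.mem_map_of_mem h
  · intro h
    obtain ⟨r, hr, hrx⟩ := List.mem_map.mp h
    have : r = x := String.toList_inj.mp hrx
    exact this ▸ hr

-- ===== VERDICT (by name: the statement is the Claim_ definition above) =====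
set_option maxRecDepth 20000 in
set_option maxHeartbeats 2000000 in
theorem is_admin_email_spec : Claim_equal_is_admin_email := by
  intro email _
  unfold Spec_is_admin_email is_admin_email is_admin_email_alt
  rw [Bool.eq_iff_iff]
  set s : List Char := (PySem.Str.lower email).toList with hs
  constructor
  · intro hA
    obtain ⟨p, hp, hpre⟩ := List.any_eq_true.mp hA
    rw [PySem.Str.startswith_eq, PySem.Chars.startswith_iff] at hpre
    obtain ⟨hq, hpq⟩ := pv_shape p hp
    rw [hpq, ← hs] at hpre
    obtain ⟨hmem, htw⟩ := (pv_prefix_iff _ s hq).mp hpre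
    simp only [Bool.and_eq_true, decide_eq_true_eq]
    refine ⟨by simp [hmem], ?_⟩
    rw [pv_mem]
    have : (String.ofList (s.takeWhile (fun c => c != '@'))).toList = p.toList.dropLast := by
      simpa using htw
    rw [this]
    exact List.mem_map_of_mem hp
  · intro hB
    simp only [Bool.and_eq_true, decide_eq_true_eq] at hB
    obtain ⟨hsep, hcont⟩ := hB
    have hmem : '@' ∈ s := by
      by_cases h : s.contains '@'
      · exact List.contains_iff_mem.mp h
      · exfalso; rw [if_neg h] at hsep; exact absurd hsep (by decide)
    rw [pv_mem] at hcont
    obtain ⟨p, hp, hpd⟩ := List.mem_map.mp hcont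
    obtain ⟨hq, hpq⟩ := pv_shape p hp
    apply List.any_eq_true.mpr
    refine ⟨p, hp, ?_⟩
    rw [PySem.Str.startswith_eq, PySem.Chars.startswith_iff, hpq, ← hs]
    rw [pv_prefix_iff _ _ hq]
    exact ⟨hmem, by simpa using hpd.symm⟩
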